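-- pv_equiv track=rewrite | github.com/liqianhao111/openvino-explicit-modeling | scripts/wwb.py | summarize_selection
-- ===== SOURCE A (Python) =====
-- from typing import Dict, List, Optional
--
-- def summarize_selection(indices: List[int], min_index: int, max_index: int) -> str:
--     normalized = sorted(set(indices))
--     if normalized == list(range(min_index, max_index + 1)):
--         return "all"
--     if not normalized:
--         return "none"
--
--     parts: List[str] = []
--     start = normalized[0]
--     end = normalized[0]
--     for idx in normalized[1:]:
--         if idx == end + 1:
--             end = idx
--         else:
--             parts.append(f"{start}" if start == end else f"{start}~{end}")
--             start = idx
--             end = idx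
--     parts.append(f"{start}" if start == end else f"{start}~{end}")
--     return ",".join(parts)
-- ===== SOURCE B (Python) =====
-- from typing import List
--
--
-- def _fmt(s: int, e: int) -> str:
--     return f"{s}" if s == e else f"{s}~{e}"
--
--
-- def summarize_selection(indices: List[int], min_index: int, max_index: int) -> str:
--     normalized = sorted(set(indices))
--     if normalized == list(range(min_index, max_index + 1)):
--         return "all"
--     if not normalized:
--         return "none"
--     pairs = list(zip(normalized, normalized[1:]))
--     starts = [normalized[0]] + [v for p, v in pairs if v != p + 1]
--     ends = [p for p, v in pairs if v != p + 1] + [normalized[-1]]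
--     return ",".join(_fmt(s, e) for s, e in zip(starts, ends))
-- ===== Notes on version B (the rewrite author's own statement) =====
-- stated objective: alternative
-- what changed: Replaces A's stateful start/end accumulator loop by a declarative zip-with-successor construction: run starts and run ends are read off as two comprehensions over adjacent pairs and zipped together.
import Mathlib
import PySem

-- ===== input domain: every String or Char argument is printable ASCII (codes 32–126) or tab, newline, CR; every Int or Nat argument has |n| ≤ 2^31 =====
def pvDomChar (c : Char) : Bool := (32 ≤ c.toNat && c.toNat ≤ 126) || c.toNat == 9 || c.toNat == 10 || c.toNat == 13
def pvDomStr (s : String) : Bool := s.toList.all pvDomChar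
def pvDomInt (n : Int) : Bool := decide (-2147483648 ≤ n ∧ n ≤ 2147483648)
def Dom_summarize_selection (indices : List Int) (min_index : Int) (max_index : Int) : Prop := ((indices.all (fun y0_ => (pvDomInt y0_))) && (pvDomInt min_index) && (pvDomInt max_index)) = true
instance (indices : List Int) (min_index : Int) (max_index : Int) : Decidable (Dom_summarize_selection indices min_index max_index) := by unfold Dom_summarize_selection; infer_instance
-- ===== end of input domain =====

-- B replaces A's stateful start/end loop by a zip-with-successor construction (alternative decomposition, same cost).

-- f"{start}" if start == end else f"{start}~{end}"  (same f-string in both Pythons)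
def pvFmt (s e : Int) : String :=
  if s = e then PySem.Int.toStr s else PySem.Str.join "~" [PySem.Int.toStr s, PySem.Int.toStr e]

-- ===== PORT A =====
-- the 'for idx in normalized[1:]' loop, state (parts, start, end); the trailing append folded into the [] case
def pvLoopA : List Int → List String → Int → Int → List String
  | [], parts, s, e => parts ++ [pvFmt s e]
  | i :: t, parts, s, e =>
      if i = e + 1 then pvLoopA t parts s i
      else pvLoopA t (parts ++ [pvFmt s e]) i i

def summarize_selection (indices : List Int) (min_index : Int) (max_index : Int) : String :=
  let normalized := PySem.List.sorted (PySem.Set.ofList indices) (fun x => x) false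
  if normalized = PySem.List.pyRange min_index (max_index + 1) 1 then "all"
  else
    match normalized with
    | [] => "none"                                   -- 'if not normalized: return "none"'
    | x :: t => PySem.Str.join "," (pvLoopA t [] x x) -- start = end = normalized[0]
-- ===== PORT B =====
def summarize_selection_alt (indices : List Int) (min_index : Int) (max_index : Int) : String :=
  let normalized := PySem.List.sorted (PySem.Set.ofList indices) (fun x => x) false
  if normalized = PySem.List.pyRange min_index (max_index + 1) 1 then "all"
  else
    match normalized with
    | [] => "none"
    | x :: t =>                                       -- normalized[0] = x, normalized[1:] = t (exact: nonempty)
      let pairs := normalized.zip t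
      let starts := x :: (pairs.filter (fun pv => pv.2 ≠ pv.1 + 1)).map (·.2)
      let ends := (pairs.filter (fun pv => pv.2 ≠ pv.1 + 1)).map (·.1) ++ [normalized.getLastD 0]
      PySem.Str.join "," ((starts.zip ends).map (fun se => pvFmt se.1 se.2))

-- ===== PRECONDITION & SPEC =====
def Spec_summarize_selection (indices : List Int) (min_index : Int) (max_index : Int) (out : String) : Prop := out = summarize_selection_alt indices min_index max_index
instance (indices : List Int) (min_index : Int) (max_index : Int) (out : String) : Decidable (Spec_summarize_selection indices min_index max_index out) := by unfold Spec_summarize_selection; infer_instance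

-- ===== CLAIM (what is proved, stated in full; the proofs are below) =====
def Claim_equal_summarize_selection : Prop := ∀ (indices : List Int) (min_index : Int) (max_index : Int), Dom_summarize_selection indices min_index max_index → Spec_summarize_selection indices min_index max_index (summarize_selection indices min_index max_index)

-- ===== LEMMAS AND PROOFS =====

-- accumulator-free form of A's loop (proof-side helper)
def pvRuns : List Int → Int → Int → List String
  | [], s, e => [pvFmt s e]
  | i :: t, s, e =>
      if i = e + 1 then pvRuns t s i
      else pvFmt s e :: pvRuns t i i

theorem pvLoopA_eq_runs (t : List Int) (parts : List String) (s e : Int) :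
    pvLoopA t parts s e = parts ++ pvRuns t s e := by
  induction t generalizing parts s e with
  | nil => simp [pvLoopA, pvRuns]
  | cons i t ih =>
      simp only [pvLoopA, pvRuns]
      split_ifs with h
      · exact ih parts s i
      · rw [ih (parts ++ [pvFmt s e]) i i]; simp

theorem pvRuns_eq_zip (t : List Int) (s e : Int) :
    pvRuns t s e =
      ((s :: (((e :: t).zip t).filter (fun pv => pv.2 ≠ pv.1 + 1)).map (·.2)).zip
        ((((e :: t).zip t).filter (fun pv => pv.2 ≠ pv.1 + 1)).map (·.1)
          ++ [(e :: t).getLastD 0])).map (fun se => pvFmt se.1 se.2) := by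
  induction t generalizing s e with
  | nil => simp [pvRuns]
  | cons i t ih =>
      by_cases h : i = e + 1
      · subst h
        rw [show pvRuns ((e + 1) :: t) s e = pvRuns t s (e + 1) from by simp [pvRuns]]
        simpa [List.filter_cons] using ih s (e + 1)
      · rw [show pvRuns (i :: t) s e = pvFmt s e :: pvRuns t i i from by simp [pvRuns, h]]
        simp only [List.zip_cons_cons, List.filter_cons]
        have hd : (decide (i ≠ e + 1)) = true := by simp [h]
        rw [hd]
        rw [ih i i]
        simp

-- ===== VERDICT (by name: the statement is the Claim_ definition above) =====
theorem summarize_selection_spec : Claim_equal_summarize_selection := by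
  intro indices min_index max_index _
  unfold Spec_summarize_selection summarize_selection summarize_selection_alt
  simp only []
  set normalized := PySem.List.sorted (PySem.Set.ofList indices) (fun x => x) false with hn
  split_ifs with h
  · rfl
  · cases normalized with
    | nil => rfl
    | cons x t =>
        simp only []
        rw [pvLoopA_eq_runs, List.nil_append, pvRuns_eq_zip]
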